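-- pv_equiv track=rewrite | github.com/WerminskiGabriel/Geometric-Algorithms-Project | plt.py | convert_regions_to_graph
-- ===== SOURCE A (Python) =====
-- def convert_regions_to_graph( regions ) :
--     all_vertices = []
--     vertex_map = { }
--     edges = []
--
--     for region in regions :
--         for point in region :
--             if point not in all_vertices :
--                 all_vertices.append( point )
--
--     all_vertices.sort( key = lambda x : (x[1] , x[0]) )
--
--     for idx , point in enumerate( all_vertices ) :
--         vertex_map[point] = idx
--
--     for region in regions :
--         for i in range( len( region ) ) :
--             p1 = region[i]
--             p2 = region[(i + 1) % len( region )]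
--             idx1 = vertex_map[p1]
--             idx2 = vertex_map[p2]
--
--             edge = tuple( sorted( [idx1 , idx2] ) )
--             if edge not in edges :
--                 edges.append( edge )
--
--     return all_vertices , edges
-- ===== SOURCE B (Python) =====
-- def convert_regions_to_graph(regions):
--     # One pass over regions: collect unique vertices AND unique canonical point-edges
--     # (ordered by first appearance); then sort vertices, build the index map, and
--     # translate the stored point-edges to index pairs.
--     vertices = []
--     point_edges = []
--     for region in regions:
--         n = len(region)
--         for i, p in enumerate(region):
--             if p not in vertices:
--                 vertices.append(p)
--             q = region[(i + 1) % n]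
--             e = (p, q) if (p[1], p[0]) <= (q[1], q[0]) else (q, p)
--             if e not in point_edges:
--                 point_edges.append(e)
--     vertices.sort(key=lambda t: (t[1], t[0]))
--     vmap = {p: i for i, p in enumerate(vertices)}
--     return vertices, [(vmap[a], vmap[b]) for a, b in point_edges]
-- ===== Notes on version B (the rewrite author's own statement) =====
-- stated objective: alternative
-- what changed: Replaces A's two separate region traversals (vertex dedup pass, then an edge pass that needs the finished index map) by a single pass that collects unique vertices and unique geometrically-canonicalized point-edges together, followed by one final mapping of stored point-edges to index pairs.
import Mathlib
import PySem

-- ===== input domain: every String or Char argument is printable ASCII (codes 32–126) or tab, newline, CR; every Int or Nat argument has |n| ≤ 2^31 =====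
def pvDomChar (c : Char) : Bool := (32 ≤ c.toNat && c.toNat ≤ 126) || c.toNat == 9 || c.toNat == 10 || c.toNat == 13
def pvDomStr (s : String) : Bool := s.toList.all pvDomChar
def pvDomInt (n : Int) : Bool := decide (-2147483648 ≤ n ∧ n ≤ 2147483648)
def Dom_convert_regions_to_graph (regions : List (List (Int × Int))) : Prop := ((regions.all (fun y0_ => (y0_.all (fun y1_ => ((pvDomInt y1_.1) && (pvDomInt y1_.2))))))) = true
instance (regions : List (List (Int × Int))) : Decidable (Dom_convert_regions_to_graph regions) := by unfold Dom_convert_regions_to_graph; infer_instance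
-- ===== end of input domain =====

-- B replaces A's two region traversals (vertices, then index-edges needing the finished
-- vertex map) by one pass collecting unique vertices and unique canonicalized point-edges,
-- followed by a final point-edge → index-pair mapping (objective: alternative decomposition).

-- ===== PORT A =====
def convert_regions_to_graph (regions : List (List (Int × Int))) : (List (Int × Int)) × (List (Int × Int)) :=
  -- for region in regions: for point in region: if point not in all_vertices: append
  let all_vertices : List (Int × Int) :=
    regions.foldl (fun av region =>
      region.foldl (fun av point => if point ∈ av then av else av ++ [point]) av) []
  -- all_vertices.sort(key = lambda x: (x[1], x[0]))
  let all_vertices := PySem.List.sorted2 all_vertices (fun x => x.2) (fun x => x.1)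
  -- for idx, point in enumerate(all_vertices): vertex_map[point] = idx
  let vertex_map : PySem.Dict (Int × Int) Int :=
    (PySem.List.enumerate all_vertices).foldl (fun d ip => d.insert ip.2 ip.1) PySem.Dict.empty
  let edges : List (Int × Int) :=
    regions.foldl (fun es region =>
      (PySem.List.pyRange 0 (PySem.List.len region)).foldl (fun es i =>
        let p1 := PySem.List.pyGetD region i (0, 0)          -- region[i]: i ∈ range(len), in range
        let p2 := PySem.List.pyGetD region (PySem.Int.mod (i + 1) (PySem.List.len region)) (0, 0)  -- region[(i+1) % len(region)]
        let idx1 := (vertex_map.getD p1 0)                   -- vertex_map[p1]: key always present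
        let idx2 := (vertex_map.getD p2 0)
        let edge := if idx1 ≤ idx2 then (idx1, idx2) else (idx2, idx1)  -- tuple(sorted([idx1, idx2]))
        if edge ∈ es then es else es ++ [edge]) es) []
  (all_vertices, edges)

-- ===== PORT B =====
def convert_regions_to_graph_alt (regions : List (List (Int × Int))) : (List (Int × Int)) × (List (Int × Int)) :=
  -- one pass: (vertices, point_edges), both deduplicated in first-appearance order
  let st :=
    regions.foldl (fun st region =>
      (PySem.List.enumerate region).foldl (fun st ip =>
        let p := ip.2
        let vertices := if p ∈ st.1 then st.1 else st.1 ++ [p]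
        let q := PySem.List.pyGetD region (PySem.Int.mod (ip.1 + 1) (PySem.List.len region)) (0, 0)  -- region[(i+1) % n]
        -- (p, q) if (p[1], p[0]) <= (q[1], q[0]) else (q, p): lexicographic tuple compare, written out
        let e := if p.2 < q.2 ∨ (p.2 = q.2 ∧ p.1 ≤ q.1) then (p, q) else (q, p)
        let point_edges := if e ∈ st.2 then st.2 else st.2 ++ [e]
        (vertices, point_edges)) st)
      (([] : List (Int × Int)), ([] : List ((Int × Int) × (Int × Int))))
  -- vertices.sort(key = lambda t: (t[1], t[0]))
  let vertices := PySem.List.sorted2 st.1 (fun t => t.2) (fun t => t.1)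
  -- vmap = {p: i for i, p in enumerate(vertices)}
  let vmap : PySem.Dict (Int × Int) Int :=
    (PySem.List.enumerate vertices).foldl (fun d ip => d.insert ip.2 ip.1) PySem.Dict.empty
  (vertices, st.2.map (fun e => (vmap.getD e.1 0, vmap.getD e.2 0)))

-- ===== PRECONDITION & SPEC =====
def Spec_convert_regions_to_graph (regions : List (List (Int × Int))) (out : (List (Int × Int)) × (List (Int × Int))) : Prop := out = convert_regions_to_graph_alt regions
instance (regions : List (List (Int × Int))) (out : (List (Int × Int)) × (List (Int × Int))) : Decidable (Spec_convert_regions_to_graph regions out) := by unfold Spec_convert_regions_to_graph; infer_instance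

-- ===== CLAIM (what is proved, stated in full; the proofs are below) =====
def Claim_equal_convert_regions_to_graph : Prop := ∀ (regions : List (List (Int × Int))), Dom_convert_regions_to_graph regions → Spec_convert_regions_to_graph regions (convert_regions_to_graph regions)

-- ===== LEMMAS AND PROOFS =====

-- the sort key (y, x) as a lexicographic pair
def pvKey (p : Int × Int) : Lex (Int × Int) := toLex (p.2, p.1)

def pvVadd (av : List (Int × Int)) (p : Int × Int) : List (Int × Int) :=
  if p ∈ av then av else av ++ [p]

def pvEadd (es : List ((Int × Int) × (Int × Int))) (e : (Int × Int) × (Int × Int)) :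
    List ((Int × Int) × (Int × Int)) := if e ∈ es then es else es ++ [e]

def pvIadd (es : List (Int × Int)) (e : Int × Int) : List (Int × Int) :=
  if e ∈ es then es else es ++ [e]

-- the deduplicated vertex list, in first-appearance order
def pvU (regions : List (List (Int × Int))) : List (Int × Int) :=
  regions.foldl (fun av region => region.foldl pvVadd av) []

-- the sorted vertex list
def pvV (regions : List (List (Int × Int))) : List (Int × Int) :=
  PySem.List.sorted (pvU regions) pvKey

def pvMap (regions : List (List (Int × Int))) : PySem.Dict (Int × Int) Int :=
  (PySem.List.enumerate (pvV regions)).foldl (fun d ip => d.insert ip.2 ip.1) PySem.Dict.empty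

def pvF (regions : List (List (Int × Int))) (p : Int × Int) : Int :=
  (pvMap regions).getD p 0

-- the canonical point-edge at index i of region r
def pvCedge (r : List (Int × Int)) (i : Int) : (Int × Int) × (Int × Int) :=
  let p := PySem.List.pyGetD r i (0, 0)
  let q := PySem.List.pyGetD r (PySem.Int.mod (i + 1) (PySem.List.len r)) (0, 0)
  if p.2 < q.2 ∨ (p.2 = q.2 ∧ p.1 ≤ q.1) then (p, q) else (q, p)

def pvCE (r : List (Int × Int)) : List ((Int × Int) × (Int × Int)) :=
  (PySem.List.pyRange 0 (PySem.List.len r)).map (pvCedge r)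

def pvG (regions : List (List (Int × Int))) (e : (Int × Int) × (Int × Int)) : Int × Int :=
  (pvF regions e.1, pvF regions e.2)

-- the B-side edge step, taking the enumerate element (index, point)
def pvCedgeP (r : List (Int × Int)) (ip : Int × (Int × Int)) : (Int × Int) × (Int × Int) :=
  let q := PySem.List.pyGetD r (PySem.Int.mod (ip.1 + 1) (PySem.List.len r)) (0, 0)
  if ip.2.2 < q.2 ∨ (ip.2.2 = q.2 ∧ ip.2.1 ≤ q.1) then (ip.2, q) else (q, ip.2)

-- sorted2 with keys (·.2), (·.1) is sorted with the lexicographic key pvKey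
theorem pv_sorted2_eq (xs : List (Int × Int)) :
    PySem.List.sorted2 xs (fun x => x.2) (fun x => x.1) = PySem.List.sorted xs pvKey := by
  have hb : (fun (a b : Int × Int) => decide (a.2 < b.2) || (!decide (b.2 < a.2) && decide (a.1 < b.1)))
      = (fun (a b : Int × Int) => decide (pvKey a < pvKey b)) := by
    funext a b
    apply Bool.eq_iff_iff.2
    simp only [Bool.or_eq_true, Bool.and_eq_true, Bool.not_eq_true', decide_eq_true_eq,
      decide_eq_false_iff_not, pvKey, Prod.Lex.toLex_lt_toLex]
    omega
  show List.foldl (fun acc x => PySem.List.insertBy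
      (fun a b => decide (a.2 < b.2) || (!decide (b.2 < a.2) && decide (a.1 < b.1))) x acc) [] xs
    = List.foldl (fun acc x => PySem.List.insertBy
      (fun a b => decide (pvKey a < pvKey b)) x acc) [] xs
  rw [hb]

-- a fold of independent pair components splits
theorem pv_foldl_prod {α β γ : Type} (f : α → γ → α) (g : β → γ → β) (l : List γ) (st : α × β) :
    (l.foldl (fun st x => (f st.1 x, g st.2 x)) st) = (l.foldl f st.1, l.foldl g st.2) := by
  induction l generalizing st with
  | nil => rfl
  | cons x xs ih => exact ih (f st.1 x, g st.2 x)

-- nested fold = fold over the flattened list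
theorem pv_foldl_flat {σ β γ : Type} (gg : σ → List β) (f : γ → β → γ) (l : List σ) (init : γ) :
    l.foldl (fun acc r => (gg r).foldl f acc) init = (l.flatMap gg).foldl f init := by
  induction l generalizing init with
  | nil => rfl
  | cons x xs ih => simp [List.flatMap_cons, List.foldl_append, ih]

theorem pv_B_eq (regions : List (List (Int × Int))) :
    convert_regions_to_graph_alt regions
      = (pvV regions, ((regions.flatMap pvCE).foldl pvEadd []).map (pvG regions)) := by
  have h1 : ∀ (region : List (Int × Int)) (st : List (Int × Int) × List ((Int × Int) × (Int × Int))),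
      (PySem.List.enumerate region).foldl (fun st ip =>
        (pvVadd st.1 ip.2, pvEadd st.2 (pvCedgeP region ip))) st
      = (region.foldl pvVadd st.1, (pvCE region).foldl pvEadd st.2) := by
    intro region st
    rw [pv_foldl_prod (fun vl (ip : Int × (Int × Int)) => pvVadd vl ip.2)
      (fun el ip => pvEadd el (pvCedgeP region ip)) (PySem.List.enumerate region) st]
    refine Prod.ext ?_ ?_
    · show List.foldl (fun vl (ip : Int × (Int × Int)) => pvVadd vl ip.2) st.1
          (PySem.List.enumerate region) = region.foldl pvVadd st.1
      rw [← List.foldl_map (f := fun ip : Int × (Int × Int) => ip.2) (g := pvVadd),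
        PySem.List.map_snd_enumerate]
    · show List.foldl (fun el ip => pvEadd el (pvCedgeP region ip)) st.2
          (PySem.List.enumerate region) = (pvCE region).foldl pvEadd st.2
      rw [← List.foldl_map (f := pvCedgeP region) (g := pvEadd)]
      congr 1
      rw [PySem.List.enumerate_eq_map_pyRange region (0, 0), List.map_map]
      rfl
  have hst : regions.foldl (fun st region =>
      (PySem.List.enumerate region).foldl (fun st ip =>
        (pvVadd st.1 ip.2, pvEadd st.2 (pvCedgeP region ip))) st)
      (([] : List (Int × Int)), ([] : List ((Int × Int) × (Int × Int))))
      = (pvU regions, (regions.flatMap pvCE).foldl pvEadd []) := by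
    rw [show (fun (st : List (Int × Int) × List ((Int × Int) × (Int × Int)))
          (region : List (Int × Int)) =>
        (PySem.List.enumerate region).foldl (fun st ip =>
          (pvVadd st.1 ip.2, pvEadd st.2 (pvCedgeP region ip))) st)
      = (fun st region => (region.foldl pvVadd st.1, (pvCE region).foldl pvEadd st.2))
      from funext fun st => funext fun region => h1 region st]
    rw [pv_foldl_prod (fun av region => region.foldl pvVadd av)
      (fun el region => (pvCE region).foldl pvEadd el) regions ([], [])]
    exact Prod.ext rfl (pv_foldl_flat pvCE pvEadd regions [])
  have hdef : convert_regions_to_graph_alt regions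
      = (fun st : List (Int × Int) × List ((Int × Int) × (Int × Int)) =>
          (PySem.List.sorted2 st.1 (fun t => t.2) (fun t => t.1),
           st.2.map (fun e =>
             (((PySem.List.enumerate (PySem.List.sorted2 st.1 (fun t => t.2) (fun t => t.1))).foldl
                 (fun d ip => d.insert ip.2 ip.1) PySem.Dict.empty).getD e.1 0,
              ((PySem.List.enumerate (PySem.List.sorted2 st.1 (fun t => t.2) (fun t => t.1))).foldl
                 (fun d ip => d.insert ip.2 ip.1) PySem.Dict.empty).getD e.2 0))))
        (regions.foldl (fun st region =>
          (PySem.List.enumerate region).foldl (fun st ip =>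
            (pvVadd st.1 ip.2, pvEadd st.2 (pvCedgeP region ip))) st) ([], [])) := rfl
  rw [hdef, hst]
  simp only [pv_sorted2_eq]
  rfl

theorem pv_map_foldl_eadd
    (G : (Int × Int) × (Int × Int) → Int × Int) (P : (Int × Int) × (Int × Int) → Prop)
    (hG : ∀ a b, P a → P b → G a = G b → a = b) :
    ∀ (l acc : List ((Int × Int) × (Int × Int))), (∀ x ∈ l, P x) → (∀ x ∈ acc, P x) →
      (l.map G).foldl pvIadd (acc.map G) = (l.foldl pvEadd acc).map G := by
  intro l
  induction l with
  | nil => intro acc _ _; rfl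
  | cons x t ih =>
    intro acc hl hacc
    have hx : P x := hl x (List.mem_cons_self)
    have ht : ∀ y ∈ t, P y := fun y hy => hl y (List.mem_cons_of_mem x hy)
    by_cases hmem : x ∈ acc
    · have hmg : G x ∈ acc.map G := List.mem_map_of_mem hmem
      simp only [List.map_cons, List.foldl_cons, pvIadd, pvEadd, if_pos hmem, if_pos hmg]
      exact ih acc ht hacc
    · have hmg : G x ∉ acc.map G := by
        intro h
        obtain ⟨a, ha, he⟩ := List.mem_map.1 h
        exact hmem ((hG a x (hacc a ha) hx he) ▸ ha)
      simp only [List.map_cons, List.foldl_cons, pvIadd, pvEadd, if_neg hmem, if_neg hmg]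
      have : (acc ++ [x]).map G = acc.map G ++ [G x] := by simp
      rw [← this]
      exact ih (acc ++ [x]) ht (by
        intro y hy
        rcases List.mem_append.1 hy with h | h
        · exact hacc y h
        · rw [List.mem_singleton.1 h]; exact hx)

theorem pv_vadd_eq : pvVadd = PySem.Set.add :=
  funext fun s => funext fun x => (PySem.Set.add_eq_ite s x).symm

theorem pv_foldl_vadd_eq_update (acc r : List (Int × Int)) :
    r.foldl pvVadd acc = PySem.Set.update acc r := by rw [pv_vadd_eq]; rfl

theorem pv_mem_U_fold (rs : List (List (Int × Int))) :
    ∀ (acc : List (Int × Int)) (y : Int × Int),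
      (y ∈ rs.foldl (fun av region => region.foldl pvVadd av) acc
        ↔ y ∈ acc ∨ ∃ r ∈ rs, y ∈ r) := by
  induction rs with
  | nil => intro acc y; simp
  | cons r t ih =>
    intro acc y
    rw [List.foldl_cons, ih, pv_foldl_vadd_eq_update, PySem.Set.mem_update,
      List.exists_mem_cons_iff]
    tauto

theorem pv_nodup_U_fold (rs : List (List (Int × Int))) :
    ∀ (acc : List (Int × Int)), acc.Nodup →
      (rs.foldl (fun av region => region.foldl pvVadd av) acc).Nodup := by
  induction rs with
  | nil => intro acc h; exact h
  | cons r t ih =>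
    intro acc h
    simp only [List.foldl_cons]
    rw [pv_foldl_vadd_eq_update]
    exact ih _ (PySem.Set.nodup_update acc r h)

theorem pv_nodup_U (regions : List (List (Int × Int))) : (pvU regions).Nodup :=
  pv_nodup_U_fold regions [] List.nodup_nil

theorem pv_nodup_V (regions : List (List (Int × Int))) : (pvV regions).Nodup :=
  ((PySem.List.sorted_perm (pvU regions) pvKey false).symm).nodup (pv_nodup_U regions)

theorem pv_mem_V {regions : List (List (Int × Int))} {r : List (Int × Int)} {x : Int × Int}
    (hr : r ∈ regions) (hx : x ∈ r) : x ∈ pvV regions := by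
  show x ∈ PySem.List.sorted (pvU regions) pvKey
  rw [PySem.List.mem_sorted]
  exact (pv_mem_U_fold regions [] x).2 (Or.inr ⟨r, hr, hx⟩)

theorem pv_pyGetD_mem (r : List (Int × Int)) {i : Int} (h0 : 0 ≤ i)
    (h1 : i < PySem.List.len r) : PySem.List.pyGetD r i (0, 0) ∈ r := by
  rw [PySem.List.pyGetD_of_nonneg r (0, 0) h0]
  have hlen : PySem.List.len r = (r.length : Int) := by simp [PySem.List.len]
  have hlt : i.toNat < r.length := by rw [hlen] at h1; omega
  rw [List.getD_eq_getElem r (0, 0) hlt]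
  exact List.getElem_mem hlt

theorem pv_mod_bounds {a n : Int} (hn : 0 < n) :
    0 ≤ PySem.Int.mod a n ∧ PySem.Int.mod a n < n := by
  have hm : PySem.Int.mod a n = a % n := by
    show Int.fmod a n = a % n
    rw [Int.fmod_eq_emod]
    simp [le_of_lt hn]
  rw [hm]
  exact ⟨Int.emod_nonneg a (ne_of_gt hn), Int.emod_lt_of_pos a hn⟩

theorem pv_flat_P (regions : List (List (Int × Int))) :
    ∀ e ∈ regions.flatMap pvCE, e.1 ∈ pvV regions ∧ e.2 ∈ pvV regions := by
  intro e he
  obtain ⟨r, hr, he⟩ := List.mem_flatMap.1 he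
  obtain ⟨i, hi, rfl⟩ := List.mem_map.1 he
  obtain ⟨h0, h1⟩ := PySem.List.mem_pyRange_one.1 hi
  have hn : (0 : Int) < PySem.List.len r := lt_of_le_of_lt h0 h1
  have hp := pv_pyGetD_mem r h0 h1
  obtain ⟨hm0, hm1⟩ := pv_mod_bounds (a := i + 1) hn
  have hq := pv_pyGetD_mem r hm0 hm1
  simp only [pvCedge]
  split_ifs
  · exact ⟨pv_mem_V hr hp, pv_mem_V hr hq⟩
  · exact ⟨pv_mem_V hr hq, pv_mem_V hr hp⟩

theorem pv_keyinj : Function.Injective pvKey := by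
  intro a b h
  have h2 : ((a.2, a.1) : Int × Int) = (b.2, b.1) := h
  exact Prod.ext (congrArg Prod.snd h2) (congrArg Prod.fst h2)

theorem pv_items (regions : List (List (Int × Int))) :
    (pvMap regions).items
      = (PySem.List.enumerate (pvV regions)).map (fun ip => (ip.2, ip.1)) := by
  have h := PySem.Dict.items_foldl_insert_fresh (PySem.List.enumerate (pvV regions))
    (fun ip => ip.2) (fun ip => ip.1) PySem.Dict.empty
    (fun a _ => PySem.Dict.contains_empty _)
    (by rw [PySem.List.map_snd_enumerate]; exact pv_nodup_V regions)
  show (List.foldl (fun d ip => d.insert ip.2 ip.1) PySem.Dict.empty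
      (PySem.List.enumerate (pvV regions))).items = _
  rw [h]
  rfl

theorem pv_keys (regions : List (List (Int × Int))) : (pvMap regions).keys = pvV regions := by
  simp only [PySem.Dict.keys, pv_items, List.map_map]
  exact PySem.List.map_snd_enumerate (pvV regions) 0

theorem pv_f_getElem (regions : List (List (Int × Int))) (i : Nat)
    (h : i < (pvV regions).length) : pvF regions ((pvV regions)[i]) = (i : Int) := by
  have hl : i < (PySem.List.enumerate (pvV regions)).length := by
    rw [PySem.List.length_enumerate]; exact h
  have hmem : ((i : Int), (pvV regions)[i]) ∈ PySem.List.enumerate (pvV regions) := by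
    have hg := PySem.List.getElem_enumerate (pvV regions) 0 i hl
    have hmm := List.getElem_mem hl
    rw [hg] at hmm
    simpa using hmm
  have hitem : ((pvV regions)[i], (i : Int)) ∈ (pvMap regions).items := by
    rw [pv_items]
    exact List.mem_map.2 ⟨_, hmem, rfl⟩
  have hnd : (pvMap regions).keys.Nodup := by rw [pv_keys]; exact pv_nodup_V regions
  exact PySem.Dict.getD_of_mem_items (pvMap regions) hitem hnd 0

theorem pv_f_lt {regions : List (List (Int × Int))} {a b : Int × Int}
    (ha : a ∈ pvV regions) (hb : b ∈ pvV regions) (h : pvKey a < pvKey b) :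
    pvF regions a < pvF regions b := by
  obtain ⟨i, hi, rfl⟩ := List.mem_iff_getElem.1 ha
  obtain ⟨j, hj, rfl⟩ := List.mem_iff_getElem.1 hb
  rw [pv_f_getElem regions i hi, pv_f_getElem regions j hj]
  have hij : i < j := by
    by_contra hle
    have hle : j ≤ i := Nat.le_of_not_lt hle
    have hmono := PySem.List.key_sorted_getElem_mono (pvU regions) pvKey hle hi
    exact absurd (lt_of_lt_of_le h hmono) (lt_irrefl _)
  exact_mod_cast hij

theorem pv_f_inj {regions : List (List (Int × Int))} {a b : Int × Int}
    (ha : a ∈ pvV regions) (hb : b ∈ pvV regions) (h : pvF regions a = pvF regions b) : a = b := by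
  obtain ⟨i, hi, rfl⟩ := List.mem_iff_getElem.1 ha
  obtain ⟨j, hj, rfl⟩ := List.mem_iff_getElem.1 hb
  rw [pv_f_getElem regions i hi, pv_f_getElem regions j hj] at h
  have : i = j := by exact_mod_cast h
  subst this
  rfl

-- the A-side edge value at index i of region r
def pvAedge (regions : List (List (Int × Int))) (r : List (Int × Int)) (i : Int) : Int × Int :=
  let p1 := PySem.List.pyGetD r i (0, 0)
  let p2 := PySem.List.pyGetD r (PySem.Int.mod (i + 1) (PySem.List.len r)) (0, 0)
  let idx1 := pvF regions p1
  let idx2 := pvF regions p2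
  if idx1 ≤ idx2 then (idx1, idx2) else (idx2, idx1)

theorem pv_edgeA (regions : List (List (Int × Int))) {r : List (Int × Int)} (hr : r ∈ regions)
    {i : Int} (h0 : 0 ≤ i) (h1 : i < PySem.List.len r) :
    pvAedge regions r i = pvG regions (pvCedge r i) := by
  have hn : (0 : Int) < PySem.List.len r := lt_of_le_of_lt h0 h1
  obtain ⟨hm0, hm1⟩ := pv_mod_bounds (a := i + 1) hn
  set p := PySem.List.pyGetD r i (0, 0) with hp
  set q := PySem.List.pyGetD r (PySem.Int.mod (i + 1) (PySem.List.len r)) (0, 0) with hq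
  have hpV : p ∈ pvV regions := pv_mem_V hr (pv_pyGetD_mem r h0 h1)
  have hqV : q ∈ pvV regions := pv_mem_V hr (pv_pyGetD_mem r hm0 hm1)
  show (if pvF regions p ≤ pvF regions q then (pvF regions p, pvF regions q)
        else (pvF regions q, pvF regions p))
      = pvG regions (if p.2 < q.2 ∨ (p.2 = q.2 ∧ p.1 ≤ q.1) then (p, q) else (q, p))
  by_cases hc : p.2 < q.2 ∨ (p.2 = q.2 ∧ p.1 ≤ q.1)
  · rw [if_pos hc]
    have hkey : pvKey p ≤ pvKey q := by
      simp only [pvKey, Prod.Lex.toLex_le_toLex]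
      exact hc
    have hle : pvF regions p ≤ pvF regions q := by
      rcases eq_or_ne p q with heq | hne
      · rw [heq]
      · exact le_of_lt (pv_f_lt hpV hqV
          (lt_of_le_of_ne hkey (fun hk => hne (pv_keyinj hk))))
    rw [if_pos hle]
    rfl
  · rw [if_neg hc]
    have hlt : pvKey q < pvKey p := by
      simp only [pvKey, Prod.Lex.toLex_lt_toLex]
      omega
    have hflt : pvF regions q < pvF regions p := pv_f_lt hqV hpV hlt
    rw [if_neg (not_le.2 hflt)]
    rfl

theorem pv_A_eq (regions : List (List (Int × Int))) :
    convert_regions_to_graph regions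
      = (pvV regions, ((regions.flatMap pvCE).map (pvG regions)).foldl pvIadd []) := by
  have hdef0 : convert_regions_to_graph regions
      = (fun av : List (Int × Int) =>
          (av, regions.foldl (fun es region =>
            (PySem.List.pyRange 0 (PySem.List.len region)).foldl (fun es i =>
              let p1 := PySem.List.pyGetD region i (0, 0)
              let p2 := PySem.List.pyGetD region
                (PySem.Int.mod (i + 1) (PySem.List.len region)) (0, 0)
              let idx1 := ((PySem.List.enumerate av).foldl
                (fun d ip => d.insert ip.2 ip.1) PySem.Dict.empty).getD p1 0
              let idx2 := ((PySem.List.enumerate av).foldl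
                (fun d ip => d.insert ip.2 ip.1) PySem.Dict.empty).getD p2 0
              let edge := if idx1 ≤ idx2 then (idx1, idx2) else (idx2, idx1)
              if edge ∈ es then es else es ++ [edge]) es) []))
        (PySem.List.sorted2 (pvU regions) (fun x => x.2) (fun x => x.1)) := rfl
  rw [hdef0, pv_sorted2_eq]
  show (pvV regions, regions.foldl (fun es region =>
      (PySem.List.pyRange 0 (PySem.List.len region)).foldl (fun es i =>
        pvIadd es (pvAedge regions region i)) es) []) = _
  refine Prod.ext rfl ?_
  show regions.foldl (fun es region =>
      (PySem.List.pyRange 0 (PySem.List.len region)).foldl (fun es i =>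
        pvIadd es (pvAedge regions region i)) es) []
    = ((regions.flatMap pvCE).map (pvG regions)).foldl pvIadd []
  rw [PySem.List.foldl_congr_mem regions _
    (fun es region => ((pvCE region).map (pvG regions)).foldl pvIadd es) []
    (by
      intro acc region hreg
      rw [← List.foldl_map (f := pvAedge regions region) (g := pvIadd)]
      congr 1
      simp only [pvCE, List.map_map]
      refine List.map_congr_left ?_
      intro i hi
      obtain ⟨h0, h1⟩ := PySem.List.mem_pyRange_one.1 hi
      exact pv_edgeA regions hreg h0 h1)]
  rw [pv_foldl_flat (fun region => (pvCE region).map (pvG regions)) pvIadd regions []]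
  rw [← List.map_flatMap]


-- ===== VERDICT (by name: the statement is the Claim_ definition above) =====
theorem convert_regions_to_graph_spec : Claim_equal_convert_regions_to_graph := by
  intro regions _
  unfold Spec_convert_regions_to_graph
  rw [pv_A_eq, pv_B_eq]
  have hinj : ∀ a b, (a.1 ∈ pvV regions ∧ a.2 ∈ pvV regions) →
      (b.1 ∈ pvV regions ∧ b.2 ∈ pvV regions) → pvG regions a = pvG regions b → a = b := by
    intro a b ha hb h
    have h1 : pvF regions a.1 = pvF regions b.1 := congrArg Prod.fst h
    have h2 : pvF regions a.2 = pvF regions b.2 := congrArg Prod.snd h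
    have e1 := pv_f_inj ha.1 hb.1 h1
    have e2 := pv_f_inj ha.2 hb.2 h2
    exact Prod.ext e1 e2
  have := pv_map_foldl_eadd (pvG regions)
      (fun e => e.1 ∈ pvV regions ∧ e.2 ∈ pvV regions) hinj
      (regions.flatMap pvCE) [] (pv_flat_P regions) (by intro x hx; cases hx)
  simp only [List.map_nil] at this
  exact congrArg (fun z => (pvV regions, z)) this
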